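-- pv_equiv track=rewrite | github.com/skydancerosel/dyck_scan | spectral/thesis_table7_replication.py | subsample_attn_logs
-- ===== SOURCE A (Python) =====
-- def subsample_attn_logs(attn_logs, grok_step):
--     """Subsample attn_logs for large files: keep first 50 + 20 around grok + last 15."""
--     n = len(attn_logs)
--     if n <= 100:
--         return attn_logs
--
--     keep = set(range(min(50, n)))
--     keep.update(range(max(0, n - 15), n))
--
--     if grok_step is not None:
--         steps = [e["step"] for e in attn_logs]
--         grok_idx = min(range(n), key=lambda i: abs(steps[i] - grok_step))
--         keep.update(range(max(0, grok_idx - 10), min(n, grok_idx + 10)))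
--
--     keep = sorted(keep)
--     return [attn_logs[i] for i in keep]
-- ===== SOURCE B (Python) =====
-- def subsample_attn_logs(attn_logs, grok_step):
--     """Subsample attn_logs for large files: keep first 50 + 20 around grok + last 15."""
--     n = len(attn_logs)
--     if n <= 100:
--         return attn_logs
--
--     intervals = [(0, min(50, n)), (max(0, n - 15), n)]
--     if grok_step is not None:
--         steps = [e["step"] for e in attn_logs]
--         grok_idx = min(range(n), key=lambda i: abs(steps[i] - grok_step))
--         intervals.append((max(0, grok_idx - 10), min(n, grok_idx + 10)))
--
--     # interval-merge sweep: slices of overlapping-or-adjacent windows, concatenated in order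
--     intervals.sort(key=lambda iv: iv[0])
--     out = []
--     end = 0
--     for a, b in intervals:
--         out.extend(attn_logs[max(a, end):max(b, end)])
--         end = max(end, b)
--     return out
-- ===== Notes on version B (the rewrite author's own statement) =====
-- stated objective: alternative
-- what changed: B replaces A's per-index machinery (a set of all kept indices, sorted, then re-indexed element by element) with an interval-merge sweep: it builds at most three (start,end) windows, sorts them by start, and concatenates clamped slices of attn_logs while advancing a merge cursor, never materialising indices; the argmin scan for grok_idx is kept identical.
import Mathlib
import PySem

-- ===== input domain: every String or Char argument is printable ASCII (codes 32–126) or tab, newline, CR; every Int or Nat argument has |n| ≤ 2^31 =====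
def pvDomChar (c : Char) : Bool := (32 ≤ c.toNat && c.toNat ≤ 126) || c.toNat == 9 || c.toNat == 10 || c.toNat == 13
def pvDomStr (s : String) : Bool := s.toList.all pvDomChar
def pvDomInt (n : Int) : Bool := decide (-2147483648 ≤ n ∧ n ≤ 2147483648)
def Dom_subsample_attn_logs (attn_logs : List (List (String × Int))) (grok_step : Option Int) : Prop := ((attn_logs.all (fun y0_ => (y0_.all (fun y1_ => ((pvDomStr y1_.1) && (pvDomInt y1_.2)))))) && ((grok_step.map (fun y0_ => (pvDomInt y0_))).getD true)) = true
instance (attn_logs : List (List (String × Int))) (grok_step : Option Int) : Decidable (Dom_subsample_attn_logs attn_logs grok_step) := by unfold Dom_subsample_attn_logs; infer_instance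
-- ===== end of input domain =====

-- B replaces A's index-set + sort + re-index pass by an interval-merge sweep concatenating slices; objective: alternative.

-- ===== PORT A =====
def subsample_attn_logs (attn_logs : List (List (String × Int))) (grok_step : Option Int) : List (List (String × Int)) :=
  let n : Int := attn_logs.length
  if n ≤ 100 then attn_logs
  else
    let keep : PySem.Set Int := PySem.Set.ofList (PySem.List.pyRange 0 (min 50 n) 1)
    let keep : PySem.Set Int := PySem.Set.update keep (PySem.List.pyRange (max 0 (n - 15)) n 1)
    let keep : PySem.Set Int :=
      match grok_step with
      | none => keep
      | some g =>
          -- e["step"]: getD's default 0 is unreachable under Pre_ (every entry has key "step")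
          let steps : List Int := attn_logs.map (fun e => (PySem.Dict.mk e).getD "step" 0)
          -- min(range(n), key=…): first minimal index; range nonempty since n > 100, so getD 0 is unreachable
          let grok_idx : Int :=
            ((PySem.List.min? (PySem.List.pyRange 0 n 1)
                (fun i => |PySem.List.pyGetD steps i 0 - g|)).getD 0)
          PySem.Set.update keep (PySem.List.pyRange (max 0 (grok_idx - 10)) (min n (grok_idx + 10)) 1)
    -- [attn_logs[i] for i in sorted(keep)]: every i is in range, so pyGet? is always some
    (PySem.List.sorted keep (fun i => i) false).filterMap
      (fun i => PySem.List.pyGet? attn_logs i)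

-- ===== PORT B =====
def subsample_attn_logs_alt (attn_logs : List (List (String × Int))) (grok_step : Option Int) : List (List (String × Int)) :=
  let n : Int := attn_logs.length
  if n ≤ 100 then attn_logs
  else
    let intervals : List (Int × Int) :=
      match grok_step with
      | none => [(0, min 50 n), (max 0 (n - 15), n)]
      | some g =>
          let steps : List Int := attn_logs.map (fun e => (PySem.Dict.mk e).getD "step" 0)
          let grok_idx : Int :=
            ((PySem.List.min? (PySem.List.pyRange 0 n 1)
                (fun i => |PySem.List.pyGetD steps i 0 - g|)).getD 0)
          [(0, min 50 n), (max 0 (n - 15), n), (max 0 (grok_idx - 10), min n (grok_idx + 10))]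
    -- intervals.sort(key=lambda iv: iv[0]); then the merge sweep with cursor `end`
    let ivs := PySem.List.sorted intervals (fun iv => iv.1) false
    (ivs.foldl (fun st iv =>
        (st.1 ++ PySem.List.slice attn_logs (some (max iv.1 st.2)) (some (max iv.2 st.2)),
         max st.2 iv.2))
      (([] : List (List (String × Int))), (0 : Int))).1

-- ===== PRECONDITION & SPEC =====
-- Pre_ excludes exactly the inputs where A raises KeyError: more than 100 entries, a grok_step, and some entry lacking key "step".
def Pre_subsample_attn_logs (attn_logs : List (List (String × Int))) (grok_step : Option Int) : Prop :=
  (attn_logs.length : Int) ≤ 100 ∨ grok_step = none ∨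
    ∀ e ∈ attn_logs, (PySem.Dict.mk e).contains "step" = true
instance (attn_logs : List (List (String × Int))) (grok_step : Option Int) : Decidable (Pre_subsample_attn_logs attn_logs grok_step) := by unfold Pre_subsample_attn_logs; infer_instance
def pvWitness_subsample_attn_logs : (List (List (String × Int))) × Option Int := ([[("step", 3)]], some 2)

def Spec_subsample_attn_logs (attn_logs : List (List (String × Int))) (grok_step : Option Int) (out : List (List (String × Int))) : Prop := out = subsample_attn_logs_alt attn_logs grok_step
instance (attn_logs : List (List (String × Int))) (grok_step : Option Int) (out : List (List (String × Int))) : Decidable (Spec_subsample_attn_logs attn_logs grok_step out) := by unfold Spec_subsample_attn_logs; infer_instance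

-- ===== CLAIM (what is proved, stated in full; the proofs are below) =====
def Claim_equal_subsample_attn_logs : Prop := ∀ (attn_logs : List (List (String × Int))) (grok_step : Option Int), Dom_subsample_attn_logs attn_logs grok_step → Pre_subsample_attn_logs attn_logs grok_step → Spec_subsample_attn_logs attn_logs grok_step (subsample_attn_logs attn_logs grok_step)

-- ===== LEMMAS AND PROOFS =====

theorem pv_slice_nil {α : Type} (xs : List α) (p q : Int) (hp : 0 ≤ p) (hq : 0 ≤ q) (hqp : q ≤ p) :
    PySem.List.slice xs (some p) (some q) = [] := by
  rw [PySem.List.slice_toNat xs hp hq]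
  have : q.toNat - p.toNat = 0 := by omega
  rw [this, List.take_zero]

theorem pv_slice_map {α : Type} (xs : List α) (d : α) (p q : Int)
    (hp : 0 ≤ p) (hpq : p ≤ q) (hq : q ≤ (xs.length : Int)) :
    PySem.List.slice xs (some p) (some q)
      = (PySem.List.pyRange p q 1).map (fun i => PySem.List.pyGetD xs i d) := by
  have h1 : (PySem.List.pyRange p (xs.length : Int) 1).map (fun i => PySem.List.pyGetD xs i d)
      = xs.drop p.toNat := PySem.List.map_pyGetD_pyRange' xs d hp
  rw [PySem.List.pyRange_one_append p q (xs.length : Int) hpq hq, List.map_append] at h1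
  rw [PySem.List.slice_toNat xs hp (hp.trans hpq), ← h1]
  rw [List.take_append_of_le_length]
  · rw [List.take_of_length_le]
    simp [PySem.List.length_pyRange_one]; omega
  · simp [PySem.List.length_pyRange_one]; omega

theorem pv_filter_range (u v a b : Int) :
    (PySem.List.pyRange u v 1).filter (fun i => decide (a ≤ i ∧ i < b))
      = PySem.List.pyRange (max u a) (min v b) 1 := by
  have hXp : ((PySem.List.pyRange u v 1).filter (fun i => decide (a ≤ i ∧ i < b))).Pairwise (· < ·) :=
    List.Pairwise.filter _ (PySem.List.pairwise_lt_pyRange_one u v)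
  have hYp := PySem.List.pairwise_lt_pyRange_one (max u a) (min v b)
  have hXnd : ((PySem.List.pyRange u v 1).filter (fun i => decide (a ≤ i ∧ i < b))).Nodup :=
    hXp.imp (fun h => ne_of_lt h)
  have hYnd : (PySem.List.pyRange (max u a) (min v b) 1).Nodup := hYp.imp (fun h => ne_of_lt h)
  have hperm : (PySem.List.pyRange (max u a) (min v b) 1).Perm
      ((PySem.List.pyRange u v 1).filter (fun i => decide (a ≤ i ∧ i < b))) := by
    refine (List.perm_ext_iff_of_nodup hYnd hXnd).mpr ?_
    intro i
    simp only [List.mem_filter, PySem.List.mem_pyRange_one, decide_eq_true_eq]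
    omega
  have e1 := PySem.List.sorted_eq_of_perm_of_pairwise_lt
    ((PySem.List.pyRange u v 1).filter (fun i => decide (a ≤ i ∧ i < b)))
    ((PySem.List.pyRange u v 1).filter (fun i => decide (a ≤ i ∧ i < b))) (fun i => i)
    (List.Perm.refl _) hXp
  have e2 := PySem.List.sorted_eq_of_perm_of_pairwise_lt
    ((PySem.List.pyRange u v 1).filter (fun i => decide (a ≤ i ∧ i < b)))
    (PySem.List.pyRange (max u a) (min v b) 1) (fun i => i) hperm hYp
  rw [← e1, e2]

theorem pv_piece {α : Type} (xs : List α) (d : α) (a b e : Int)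
    (he : 0 ≤ e) (hen : e ≤ (xs.length : Int)) (hb : b ≤ (xs.length : Int)) :
    PySem.List.slice xs (some (max a e)) (some (max b e))
      = ((PySem.List.pyRange e (max e b) 1).filter (fun i => decide (a ≤ i ∧ i < b))).map
          (fun i => PySem.List.pyGetD xs i d) := by
  rw [pv_filter_range]
  by_cases hab : max a e ≤ max b e
  · rw [pv_slice_map xs d _ _ (by omega) hab (by omega)]
    by_cases heb : e ≤ b
    · have h1 : max a e = max e a := by omega
      have h2 : max b e = min (max e b) b := by omega
      rw [h1, h2]
    · rw [PySem.List.pyRange_one_eq_nil (by omega), PySem.List.pyRange_one_eq_nil (by omega)]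
  · rw [pv_slice_nil xs _ _ (by omega) (by omega) (by omega),
      PySem.List.pyRange_one_eq_nil (by omega), List.map_nil]

theorem pv_merge {α : Type} (xs : List α) (d : α) (ivs : List (Int × Int)) (acc : List α) (e : Int)
    (he : 0 ≤ e) (hen : e ≤ (xs.length : Int))
    (hs : ivs.Pairwise (fun p q => p.1 ≤ q.1))
    (hends : ∀ iv ∈ ivs, iv.2 ≤ (xs.length : Int)) :
    (ivs.foldl (fun st iv =>
        (st.1 ++ PySem.List.slice xs (some (max iv.1 st.2)) (some (max iv.2 st.2)),
         max st.2 iv.2)) (acc, e)).1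
      = acc ++ ((PySem.List.pyRange e (xs.length : Int) 1).filter
            (fun i => ivs.any (fun iv => decide (iv.1 ≤ i ∧ i < iv.2)))).map
          (fun i => PySem.List.pyGetD xs i d) := by
  induction ivs generalizing acc e with
  | nil =>
      simp [List.foldl_nil, List.any_nil]
  | cons iv rest ih =>
      rcases List.pairwise_cons.mp hs with ⟨hfirst, hrest⟩
      have hb : iv.2 ≤ (xs.length : Int) := hends iv List.mem_cons_self
      simp only [List.foldl_cons]
      rw [ih (acc ++ PySem.List.slice xs (some (max iv.1 e)) (some (max iv.2 e))) (max e iv.2)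
        (by omega) (by omega) hrest (fun j hj => hends j (List.mem_cons_of_mem _ hj))]
      rw [PySem.List.pyRange_one_append e (max e iv.2) (xs.length : Int) (le_max_left _ _) (by omega),
        List.filter_append, List.map_append, List.append_assoc]
      congr 1
      congr 1
      · -- first segment: the slice
        rw [pv_piece xs d iv.1 iv.2 e he hen hb]
        congr 1
        apply List.filter_congr
        intro i hi
        have hir := PySem.List.mem_pyRange_one.mp hi
        have hib : i < iv.2 := by omega
        simp only [List.any_cons]
        cases hQ : rest.any (fun jv => decide (jv.1 ≤ i ∧ i < jv.2)) with
        | false => simp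
        | true =>
            rcases List.any_eq_true.mp hQ with ⟨jv, hjmem, hjc⟩
            have hj := decide_eq_true_eq.mp hjc
            have : iv.1 ≤ jv.1 := hfirst jv hjmem
            have : iv.1 ≤ i ∧ i < iv.2 := by omega
            simp [this]
      · -- second segment: iv is dead past the cursor
        congr 1
        apply List.filter_congr
        intro i hi
        have hir := PySem.List.mem_pyRange_one.mp hi
        have : ¬ (iv.1 ≤ i ∧ i < iv.2) := by omega
        simp [List.any_cons, this]

theorem pv_main (xs : List (List (String × Int))) (lo hi : Int)
    (h : 100 < (xs.length : Int)) (hlo : 0 ≤ lo) (hhi : hi ≤ (xs.length : Int)) :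
    (PySem.List.sorted
        (PySem.Set.update
          (PySem.Set.update (PySem.Set.ofList (PySem.List.pyRange 0 (min 50 (xs.length : Int)) 1))
            (PySem.List.pyRange (max 0 ((xs.length : Int) - 15)) (xs.length : Int) 1))
          (PySem.List.pyRange lo hi 1))
        (fun i => i) false).filterMap (fun i => PySem.List.pyGet? xs i)
    = ((PySem.List.pyRange 0 (xs.length : Int) 1).filter
          (fun i => decide (i < 50 ∨ (xs.length : Int) - 15 ≤ i ∨ (lo ≤ i ∧ i < hi)))).map
        (fun i => PySem.List.pyGetD xs i ([] : List (String × Int))) := by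
  set n : Int := (xs.length : Int) with hn
  set keep : PySem.Set Int :=
    PySem.Set.update
      (PySem.Set.update (PySem.Set.ofList (PySem.List.pyRange 0 (min 50 n) 1))
        (PySem.List.pyRange (max 0 (n - 15)) n 1))
      (PySem.List.pyRange lo hi 1) with hkeep
  set L : List Int :=
    (PySem.List.pyRange 0 n 1).filter
      (fun i => decide (i < 50 ∨ n - 15 ≤ i ∨ (lo ≤ i ∧ i < hi))) with hL
  have hkeepnodup : keep.Nodup := by
    rw [hkeep]
    exact PySem.Set.nodup_update _ _ (PySem.Set.nodup_update _ _ (PySem.Set.nodup_ofList _))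
  have hLnodup : L.Nodup := List.Nodup.filter _ (PySem.List.nodup_pyRange_one 0 n)
  have hmem : ∀ i : Int, i ∈ L ↔ i ∈ keep := by
    intro i
    rw [hL, hkeep]
    simp only [List.mem_filter, PySem.Set.mem_update, PySem.Set.mem_ofList,
      PySem.List.mem_pyRange_one, decide_eq_true_eq]
    constructor
    · rintro ⟨⟨h0, h1⟩, h2⟩; omega
    · rintro h2
      rcases h2 with (⟨h3, h4⟩ | ⟨h3, h4⟩) | ⟨h3, h4⟩ <;> refine ⟨by omega, by omega⟩
  have hperm : L.Perm keep :=
    (List.perm_ext_iff_of_nodup hLnodup hkeepnodup).mpr hmem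
  have hpair : L.Pairwise (fun a b : Int => (fun i : Int => i) a < (fun i : Int => i) b) :=
    List.Pairwise.filter _ (PySem.List.pairwise_lt_pyRange_one 0 n)
  rw [PySem.List.sorted_eq_of_perm_of_pairwise_lt keep L (fun i => i) hperm hpair]
  rw [← List.filterMap_eq_map]
  apply List.filterMap_congr
  intro i hiL
  have hir : 0 ≤ i ∧ i < n := by
    have := (List.mem_filter.mp hiL).1
    exact PySem.List.mem_pyRange_one.mp this
  simp only [Function.comp_apply]
  rw [PySem.List.pyGet?_eq_some_getElem xs hir.1 hir.2,
    PySem.List.pyGetD_eq_getElem xs ([] : List (String × Int)) hir.1 hir.2]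

theorem pv_b_side (xs : List (List (String × Int))) (intervals : List (Int × Int))
    (hends : ∀ iv ∈ intervals, iv.2 ≤ (xs.length : Int)) :
    ((PySem.List.sorted intervals (fun iv => iv.1) false).foldl (fun st iv =>
        (st.1 ++ PySem.List.slice xs (some (max iv.1 st.2)) (some (max iv.2 st.2)),
         max st.2 iv.2)) (([] : List (List (String × Int))), (0 : Int))).1
      = ((PySem.List.pyRange 0 (xs.length : Int) 1).filter
            (fun i => intervals.any (fun iv => decide (iv.1 ≤ i ∧ i < iv.2)))).map
          (fun i => PySem.List.pyGetD xs i ([] : List (String × Int))) := by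
  have hperm := PySem.List.sorted_perm intervals (fun iv => iv.1) false
  have hpair := PySem.List.sorted_pairwise intervals (fun iv => iv.1)
  rw [pv_merge xs ([] : List (String × Int)) _ _ 0 le_rfl (by positivity) hpair
    (fun iv hiv => hends iv ((PySem.List.mem_sorted _ _ _ _).mp hiv))]
  rw [List.nil_append]
  congr 1
  apply List.filter_congr
  intro i _
  exact hperm.any_eq


-- ===== VERDICT (by name: the statement is the Claim_ definition above) =====
theorem subsample_attn_logs_spec : Claim_equal_subsample_attn_logs := by
  intro attn_logs grok_step _hdom _hpre
  unfold Spec_subsample_attn_logs subsample_attn_logs subsample_attn_logs_alt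
  by_cases hn : (attn_logs.length : Int) ≤ 100
  · simp [hn]
  · simp only [hn, if_false]
    have h : 100 < (attn_logs.length : Int) := by omega
    cases grok_step with
    | none =>
        have hA := pv_main attn_logs 0 0 h le_rfl (by omega)
        rw [PySem.List.pyRange_one_eq_nil (le_refl (0 : Int)), PySem.Set.update_nil] at hA
        have hB := pv_b_side attn_logs
          [(0, min 50 (attn_logs.length : Int)),
           (max 0 ((attn_logs.length : Int) - 15), (attn_logs.length : Int))]
          (by intro iv hiv
              simp only [List.mem_cons, List.not_mem_nil, or_false] at hiv
              rcases hiv with rfl | rfl <;> dsimp only <;> omega)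
        refine hA.trans (Eq.trans ?_ hB.symm)
        apply congrArg
        apply List.filter_congr
        intro i hi
        have hir := PySem.List.mem_pyRange_one.mp hi
        simp only [List.any_cons, List.any_nil, Bool.or_false, ← Bool.decide_or]
        exact decide_eq_decide.mpr (by omega)
    | some g =>
        have hA := pv_main attn_logs
          (max 0 (((PySem.List.min? (PySem.List.pyRange 0 (attn_logs.length : Int) 1)
              (fun i => |PySem.List.pyGetD (attn_logs.map (fun e => (PySem.Dict.mk e).getD "step" 0)) i 0 - g|)).getD 0) - 10))
          (min (attn_logs.length : Int) (((PySem.List.min? (PySem.List.pyRange 0 (attn_logs.length : Int) 1)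
              (fun i => |PySem.List.pyGetD (attn_logs.map (fun e => (PySem.Dict.mk e).getD "step" 0)) i 0 - g|)).getD 0) + 10))
          h (le_max_left _ _) (min_le_left _ _)
        have hB := pv_b_side attn_logs
          [(0, min 50 (attn_logs.length : Int)),
           (max 0 ((attn_logs.length : Int) - 15), (attn_logs.length : Int)),
           (max 0 (((PySem.List.min? (PySem.List.pyRange 0 (attn_logs.length : Int) 1)
              (fun i => |PySem.List.pyGetD (attn_logs.map (fun e => (PySem.Dict.mk e).getD "step" 0)) i 0 - g|)).getD 0) - 10),
            min (attn_logs.length : Int) (((PySem.List.min? (PySem.List.pyRange 0 (attn_logs.length : Int) 1)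
              (fun i => |PySem.List.pyGetD (attn_logs.map (fun e => (PySem.Dict.mk e).getD "step" 0)) i 0 - g|)).getD 0) + 10))]
          (by intro iv hiv
              simp only [List.mem_cons, List.not_mem_nil, or_false] at hiv
              rcases hiv with rfl | rfl | rfl <;> dsimp only <;> omega)
        refine hA.trans (Eq.trans ?_ hB.symm)
        apply congrArg
        apply List.filter_congr
        intro i hi
        have hir := PySem.List.mem_pyRange_one.mp hi
        simp only [List.any_cons, List.any_nil, Bool.or_false, ← Bool.decide_or]
        exact decide_eq_decide.mpr (by omega)
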